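-- pv_equiv track=rewrite | github.com/0xStryK3R/Scaler-DSA-Revision | python/Day 9/CW_3.py | solve
-- ===== SOURCE A (Python) =====
-- def solve(A):
--     N = ans = len(A)
--     i = 0
--     while(i+1 < N):
--         if A[i] & 1 == A[i+1] & 1:
--             ans -= 1
--         i += 1
--
--     return ans
-- ===== SOURCE B (Python) =====
-- def solve(A):
--     # Build the list of maximal runs of consecutive same-parity elements
--     # as an explicit list of lists, then return how many runs there are.
--     runs = []
--     for x in A:
--         if runs and (runs[-1][0] & 1) == (x & 1):
--             runs[-1].append(x)
--         else:
--             runs.append([x])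
--     return len(runs)
-- ===== Notes on version B (the rewrite author's own statement) =====
-- stated objective: alternative
-- what changed: B materialises the maximal same-parity runs as an explicit list-of-lists accumulator (append to the current run or open a new one) and returns the number of runs, instead of A's counter that starts at len(A) and is decremented once per adjacent same-parity pair found via indexed lookups A[i], A[i+1].
import Mathlib
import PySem

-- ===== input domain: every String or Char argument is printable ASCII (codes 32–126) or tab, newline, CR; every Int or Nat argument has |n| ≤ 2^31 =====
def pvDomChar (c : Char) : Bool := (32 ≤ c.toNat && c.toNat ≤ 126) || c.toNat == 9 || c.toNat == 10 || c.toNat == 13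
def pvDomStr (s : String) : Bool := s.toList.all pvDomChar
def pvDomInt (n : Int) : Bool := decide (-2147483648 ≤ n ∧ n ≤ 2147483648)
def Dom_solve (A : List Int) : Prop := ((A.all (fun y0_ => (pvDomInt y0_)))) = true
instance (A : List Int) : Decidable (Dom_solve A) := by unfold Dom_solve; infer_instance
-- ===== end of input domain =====

-- B materialises the maximal same-parity runs as an explicit list of lists and
-- returns how many there are, instead of A's len-minus-same-parity-pairs counter.

-- ===== PORT A =====
-- the while loop walks index i comparing A[i] with A[i+1]; transcribed as the
-- structural recursion over the same consecutive pairs, carrying ans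
def solveGo (ans : Int) : List Int → Int
  | x :: y :: rest => solveGo (if Int.land x 1 = Int.land y 1 then ans - 1 else ans) (y :: rest)
  | _ => ans

def solve (A : List Int) : Int := solveGo (A.length : Int) A

-- ===== PORT B =====
-- one step of B's loop: append x to the current (last) run if parities match,
-- else open a new run; runs are kept most-recent-first
def stepB (rs : List (List Int)) (x : Int) : List (List Int) :=
  match rs with
  | (h :: t) :: rt =>
      if Int.land h 1 = Int.land x 1 then (h :: (t ++ [x])) :: rt
      else [x] :: (h :: t) :: rt
  | _ => [x] :: rs

def solve_alt (A : List Int) : Int := ((A.foldl stepB []).length : Int)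

-- ===== PRECONDITION & SPEC =====
def Spec_solve (A : List Int) (out : Int) : Prop := out = solve_alt A
instance (A : List Int) (out : Int) : Decidable (Spec_solve A out) := by unfold Spec_solve; infer_instance

-- ===== CLAIM (what is proved, stated in full; the proofs are below) =====
def Claim_equal_solve : Prop := ∀ (A : List Int), Dom_solve A → Spec_solve A (solve A)

-- ===== LEMMAS AND PROOFS =====

-- invariant of B's fold against A's pair scan: the head run's first element h
-- has the same parity as the last element x already consumed
lemma fold_stepB_eq (l : List Int) : ∀ (h x : Int), Int.land h 1 = Int.land x 1 →
    ∀ (t : List Int) (rt : List (List Int)) (a : Int),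
    ((l.foldl stepB ((h :: t) :: rt)).length : Int)
      = rt.length + 1 + solveGo a (x :: l) - a + l.length := by
  induction l with
  | nil => intro h x _ t rt a; simp [solveGo]
  | cons y ys ih =>
    intro h x hpar t rt a
    simp only [List.foldl_cons, stepB]
    by_cases hy : Int.land x 1 = Int.land y 1
    · rw [if_pos (hpar.trans hy)]
      have := ih h y (hpar.trans hy) (t ++ [y]) rt (a - 1)
      rw [this]
      simp only [solveGo, if_pos hy, List.length_cons]
      push_cast; ring
    · rw [if_neg (fun hc => hy (hpar.symm ▸ hc))]
      have := ih y y rfl [] ((h :: t) :: rt) a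
      rw [this]
      simp only [solveGo, if_neg hy, List.length_cons]
      push_cast; ring

-- ===== VERDICT (by name: the statement is the Claim_ definition above) =====
theorem solve_spec : Claim_equal_solve := by
  intro A _
  unfold Spec_solve solve solve_alt
  cases A with
  | nil => simp [solveGo]
  | cons x xs =>
    simp only [List.foldl_cons, stepB]
    have := fold_stepB_eq xs x x rfl [] [] (((x :: xs).length : Int))
    rw [this]
    simp [List.length_cons]
    ring
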